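-- pv_equiv track=rewrite | github.com/robhendrik/FockStateCircuit | src/fock_state_circuit/quantum_operator_functionality/quantum_operators.py | _generate_limited_basis
-- ===== SOURCE A (Python) =====
-- def _generate_limited_basis(operator_channels: list[int], length_of_fock_state: int) -> tuple[dict,dict]:
--     """ Generate lookup-tables for the limited basis. The limited basis covers all possible photon numbers for the channels relevant for the operator.
--
--         Example:
--             If length_of_fock_state is 3 we allow photon numbers 0,1,2. If wehave operator channels [0,0,1,1]. So we need a basis for two channels with up to 2 photons.
--             The basis states will be ('00','10','20','01','11','21','02','12','22')
--
--     Args: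
--         operator_channels (list[int]): list of channels describing whether there creation/annihilation operators act on the same or different channels.  If the
--                                 string in the operator has 4 characters (like '+-00') we need 4 channels in the operator_channels (like [0,0,1,1]).
--         length_of_fock_state (int): Maximum number of photons in a optical channel, can be taken from FockStateCircuit._length_of_fock_state,
--                             CollectionOfStates._length_of_fock_state or State._length_of_fock_state
--
--     Returns:
--         tuple[dicts]: Tuple of two lookup-tables from index to state, and form state to index.
--     """
--     number_of_channels = len(set(operator_channels))
--     lim_basis_to_values, lim_basis_to_index = dict([]), dict([])
--     for number in range(length_of_fock_state** number_of_channels):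
--         d = number
--         channel_values = []
--         while d > 0:
--             d,n = divmod(d,length_of_fock_state)
--             channel_values.append(n)
--         channel_values += [0] * ( number_of_channels - len(channel_values))
--         lim_basis_to_values.update({number:tuple(channel_values)})
--         lim_basis_to_index.update({tuple(channel_values):number})
--     return lim_basis_to_values, lim_basis_to_index
-- ===== SOURCE B (Python) =====
-- def _generate_limited_basis(operator_channels: list[int], length_of_fock_state: int) -> tuple[dict, dict]:
--     number_of_channels = len(set(operator_channels))
--     # build all digit tuples by an iterated Cartesian product: each round appends
--     # one more (most significant) digit, keeping the least significant digit fastest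
--     tuples = [()]
--     for _ in range(number_of_channels):
--         tuples = [t + (v,) for v in range(length_of_fock_state) for t in tuples]
--     lim_basis_to_values = dict(enumerate(tuples))
--     lim_basis_to_index = {t: i for i, t in enumerate(tuples)}
--     return lim_basis_to_values, lim_basis_to_index
-- ===== Notes on version B (the rewrite author's own statement) =====
-- stated objective: alternative
-- what changed: B builds the whole basis as an iterated Cartesian product (each round appends one more most-significant digit to every existing tuple) and then enumerates the resulting list once, instead of A's per-index base-L digit extraction with divmod and zero padding.
-- outside the precondition, e.g. on _generate_limited_basis([0, 1], -1): A returns ({0: (0, 0)}, {(0, 0): 0}), B returns ({}, {})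
import Mathlib
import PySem

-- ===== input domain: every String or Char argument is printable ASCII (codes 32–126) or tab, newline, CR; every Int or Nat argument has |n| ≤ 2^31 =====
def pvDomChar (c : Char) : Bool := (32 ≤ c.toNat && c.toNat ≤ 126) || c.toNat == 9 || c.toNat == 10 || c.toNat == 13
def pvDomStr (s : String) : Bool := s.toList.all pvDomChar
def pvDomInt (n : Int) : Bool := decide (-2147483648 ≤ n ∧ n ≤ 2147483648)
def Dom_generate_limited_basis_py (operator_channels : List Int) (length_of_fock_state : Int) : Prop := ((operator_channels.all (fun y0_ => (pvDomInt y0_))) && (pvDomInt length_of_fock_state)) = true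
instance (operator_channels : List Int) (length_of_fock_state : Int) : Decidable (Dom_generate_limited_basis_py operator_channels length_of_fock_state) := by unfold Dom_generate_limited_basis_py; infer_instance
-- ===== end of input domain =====

-- B replaces A's per-index divmod digit extraction by an iterated-Cartesian-product
-- construction of all digit tuples; equal outputs are proved for length_of_fock_state ≥ 0.

-- ===== PORT A =====
-- the `while d > 0: d, n = divmod(d, length_of_fock_state)` loop; the fuel `d.toNat`
-- only makes the recursion structural, it suffices on every state the program reaches
def pvDigitsGo : Nat → Int → Int → List Int
  | 0, _, _ => []
  | f + 1, d, L =>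
    if 0 < d then PySem.Int.mod d L :: pvDigitsGo f (PySem.Int.floordiv d L) L
    else []

-- A's body after `number_of_channels = len(set(operator_channels))` has been computed
def pvABody (k : Nat) (L : Int) : (List (Int × List Int)) × (List (List Int × Int)) :=
  let r := (PySem.List.pyRange 0 (L ^ k) 1).foldl
    (fun (tabs : PySem.Dict Int (List Int) × PySem.Dict (List Int) Int) number =>
      let cv := pvDigitsGo number.toNat number L
      let cv := cv ++ List.replicate (k - cv.length) 0
      (tabs.1.insert number cv, tabs.2.insert cv number))
    (PySem.Dict.empty, PySem.Dict.empty)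
  (r.1.items, r.2.items)

def generate_limited_basis_py (operator_channels : List Int) (length_of_fock_state : Int) : (List (Int × List Int)) × (List (List Int × Int)) :=
  pvABody (PySem.Set.ofList operator_channels).length length_of_fock_state

-- ===== PORT B =====
-- B's body: iterated Cartesian product, then dict(enumerate(tuples)) and {t: i}
def pvBBody (k : Nat) (L : Int) : (List (Int × List Int)) × (List (List Int × Int)) :=
  let tuples := (List.range k).foldl
    (fun ts _ => (PySem.List.pyRange 0 L 1).flatMap (fun v => ts.map (fun t => t ++ [v])))
    [([] : List Int)]
  let toValues := (PySem.List.enumerate tuples 0).foldl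
    (fun (d : PySem.Dict Int (List Int)) p => d.insert p.1 p.2) PySem.Dict.empty
  let toIndex := (PySem.List.enumerate tuples 0).foldl
    (fun (d : PySem.Dict (List Int) Int) p => d.insert p.2 p.1) PySem.Dict.empty
  (toValues.items, toIndex.items)

def generate_limited_basis_py_alt (operator_channels : List Int) (length_of_fock_state : Int) : (List (Int × List Int)) × (List (List Int × Int)) :=
  pvBBody (PySem.Set.ofList operator_channels).length length_of_fock_state

-- ===== PRECONDITION & SPEC =====
-- Pre_ restricts to the natural domain length_of_fock_state ≥ 0 (it counts photon values);
-- for a negative length A still returns, but its negative-divisor divmod digits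
-- (with clashing tuple keys) are an accident of its implementation.
def Pre_generate_limited_basis_py (operator_channels : List Int) (length_of_fock_state : Int) : Prop :=
  0 ≤ length_of_fock_state
instance (operator_channels : List Int) (length_of_fock_state : Int) : Decidable (Pre_generate_limited_basis_py operator_channels length_of_fock_state) := by unfold Pre_generate_limited_basis_py; infer_instance
def pvWitness_generate_limited_basis_py : List Int × Int := ([0, 1], 2)

def Spec_generate_limited_basis_py (operator_channels : List Int) (length_of_fock_state : Int) (out : (List (Int × List Int)) × (List (List Int × Int))) : Prop := out = generate_limited_basis_py_alt operator_channels length_of_fock_state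
instance (operator_channels : List Int) (length_of_fock_state : Int) (out : (List (Int × List Int)) × (List (List Int × Int))) : Decidable (Spec_generate_limited_basis_py operator_channels length_of_fock_state out) := by unfold Spec_generate_limited_basis_py; infer_instance

-- ===== CLAIM (what is proved, stated in full; the proofs are below) =====
def Claim_equal_generate_limited_basis_py : Prop := ∀ (operator_channels : List Int) (length_of_fock_state : Int), Dom_generate_limited_basis_py operator_channels length_of_fock_state → Pre_generate_limited_basis_py operator_channels length_of_fock_state → Spec_generate_limited_basis_py operator_channels length_of_fock_state (generate_limited_basis_py operator_channels length_of_fock_state)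

-- ===== LEMMAS AND PROOFS =====

-- A's padded digit list for one index
def pvPad (k : Nat) (L n : Int) : List Int :=
  pvDigitsGo n.toNat n L ++ List.replicate (k - (pvDigitsGo n.toNat n L).length) 0

-- little-endian value of a digit list (used only to prove the digit tuples distinct)
def pvVal (L : Int) : List Int → Int
  | [] => 0
  | a :: t => a + L * pvVal L t

theorem pvEdivLt (a b : Int) (ha : 0 < a) (hb : 1 < b) : a / b < a := by
  have h1 : a / b * b ≤ a := Int.ediv_mul_le a (by omega)
  have h2 : 0 ≤ a / b := Int.ediv_nonneg ha.le (by omega)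
  nlinarith

theorem pvDigitsGo_zero (f : Nat) (L : Int) : pvDigitsGo f 0 L = [] := by
  cases f <;> simp [pvDigitsGo]

theorem pvPad_zero (k : Nat) (L : Int) : pvPad k L 0 = List.replicate k 0 := by
  simp [pvPad, pvDigitsGo_zero]

theorem pvDigitsGo_fuel (L : Int) (hL : 2 ≤ L) :
    ∀ (f₁ f₂ : Nat) (d : Int), 0 ≤ d → d.toNat ≤ f₁ → d.toNat ≤ f₂ →
      pvDigitsGo f₁ d L = pvDigitsGo f₂ d L := by
  intro f₁
  induction f₁ with
  | zero =>
    intro f₂ d hd h1 _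
    have : d = 0 := by omega
    subst this
    simp [pvDigitsGo_zero]
  | succ f ih =>
    intro f₂ d hd h1 h2
    by_cases hpos : 0 < d
    · obtain ⟨g, rfl⟩ : ∃ g, f₂ = g + 1 := by
        cases f₂ with
        | zero => omega
        | succ g => exact ⟨g, rfl⟩
      have hdiv : PySem.Int.floordiv d L = d / L :=
        PySem.Int.floordiv_eq_ediv_of_pos (by omega)
      have hlt : d / L < d := pvEdivLt d L hpos (by omega)
      have hnn : 0 ≤ d / L := Int.ediv_nonneg hd (by omega)
      simp only [pvDigitsGo, if_pos hpos, hdiv]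
      rw [ih g (d / L) hnn (by omega) (by omega)]
    · have : d = 0 := by omega
      subst this
      simp [pvDigitsGo_zero]

-- little-endian recurrence for the padded digit list
theorem pvPad_rec (k : Nat) (L n : Int) (hL : 0 ≤ L) (hn : 0 ≤ n)
    (hlt : n < L ^ (k + 1)) :
    pvPad (k + 1) L n = PySem.Int.mod n L :: pvPad k L (PySem.Int.floordiv n L) := by
  by_cases hpos : 0 < n
  · have hL2 : 2 ≤ L := by
      by_contra h
      interval_cases L <;> simp_all <;> omega
    have hLpos : (0:Int) < L := by omega
    have hdiv : PySem.Int.floordiv n L = n / L := PySem.Int.floordiv_eq_ediv_of_pos hLpos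
    obtain ⟨f, hf⟩ : ∃ f, n.toNat = f + 1 := ⟨n.toNat - 1, by omega⟩
    have hlt' : n / L < n := pvEdivLt n L hpos (by omega)
    have hnn' : 0 ≤ n / L := Int.ediv_nonneg (by omega) (by omega)
    have hd : pvDigitsGo n.toNat n L =
        PySem.Int.mod n L :: pvDigitsGo ((n / L).toNat) (n / L) L := by
      rw [hf]
      simp only [pvDigitsGo, if_pos hpos, hdiv]
      congr 1
      exact pvDigitsGo_fuel L hL2 f (n / L).toNat (n / L) hnn' (by omega) (le_refl _)
    rw [pvPad, hd]
    simp only [List.length_cons, List.cons_append, Nat.succ_sub_succ]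
    rw [pvPad, hdiv]
  · have : n = 0 := by omega
    subst this
    rcases (by omega : (0:Int) < L ∨ L = 0) with hL1 | hL1
    · have hdiv : PySem.Int.floordiv 0 L = 0 := by
        rw [PySem.Int.floordiv_eq_ediv_of_pos hL1]; simp
      have hmod : PySem.Int.mod 0 L = 0 := by
        rw [PySem.Int.mod_eq_emod_of_pos hL1]; simp
      simp [pvPad_zero, hdiv, hmod, List.replicate_succ]
    · subst hL1
      simp at hlt

-- most-significant-digit recurrence
theorem pvPad_ms : ∀ (k : Nat) (L v n : Int), 0 ≤ v → v < L → 0 ≤ n → n < L ^ k →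
    pvPad (k + 1) L (v * L ^ k + n) = pvPad k L n ++ [v] := by
  intro k
  induction k with
  | zero =>
    intro L v n hv hvL hn hnlt
    have hn0 : n = 0 := by simp at hnlt; omega
    subst hn0
    have hL : (0:Int) < L := by omega
    have h1 : pvPad 1 L v = PySem.Int.mod v L :: pvPad 0 L (PySem.Int.floordiv v L) :=
      pvPad_rec 0 L v hL.le hv (by simpa using hvL)
    have hdiv : PySem.Int.floordiv v L = 0 := by
      rw [PySem.Int.floordiv_eq_ediv_of_pos hL]
      exact Int.ediv_eq_zero_of_lt hv hvL
    have hmod : PySem.Int.mod v L = v := by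
      rw [PySem.Int.mod_eq_emod_of_pos hL]
      exact Int.emod_eq_of_lt hv hvL
    simpa [pvPad_zero, hdiv, hmod] using h1
  | succ k ih =>
    intro L v n hv hvL hn hnlt
    have hL : (0:Int) < L := by omega
    have hpow : (0:Int) < L ^ (k + 1) := pow_pos hL _
    have hpowk : (0:Int) < L ^ k := pow_pos hL _
    set m : Int := v * L ^ (k + 1) + n with hm
    have hmn : 0 ≤ m := by positivity
    have hmlt : m < L ^ (k + 1 + 1) := by
      have h1 : L ^ (k + 1 + 1) = L ^ (k + 1) * L := by ring
      nlinarith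
    have hsplit : m = n + (v * L ^ k) * L := by rw [hm]; ring
    have hmod : m % L = n % L := by rw [hsplit]; simp [Int.add_mul_emod_self_right]
    have hdivm : m / L = n / L + v * L ^ k := by
      rw [hsplit]; exact Int.add_mul_ediv_right n (v * L ^ k) (by omega)
    have hndiv_nn : 0 ≤ n / L := Int.ediv_nonneg hn hL.le
    have hndiv_lt : n / L < L ^ k := by
      by_contra h
      have h0 : L ^ k ≤ n / L := not_lt.mp h
      have h1 : n / L * L ≤ n := Int.ediv_mul_le n (by omega)
      have h2 : L ^ k * L ≤ n / L * L := by nlinarith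
      have h3 : L ^ (k + 1) = L ^ k * L := by ring
      omega
    have hrecm := pvPad_rec (k + 1) L m hL.le hmn hmlt
    have hrecn := pvPad_rec k L n hL.le hn hnlt
    have hmodeq : PySem.Int.mod m L = PySem.Int.mod n L := by
      rw [PySem.Int.mod_eq_emod_of_pos hL, PySem.Int.mod_eq_emod_of_pos hL, hmod]
    have hdiveq : PySem.Int.floordiv m L = v * L ^ k + n / L := by
      rw [PySem.Int.floordiv_eq_ediv_of_pos hL, hdivm]; ring
    have hdiveqn : PySem.Int.floordiv n L = n / L := PySem.Int.floordiv_eq_ediv_of_pos hL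
    rw [hrecm, hmodeq, hdiveq, ih L v (n / L) hv hvL hndiv_nn hndiv_lt, hrecn, hdiveqn]
    rfl

theorem pvVal_pad : ∀ (k : Nat) (L n : Int), 0 ≤ L → 0 ≤ n → n < L ^ k →
    pvVal L (pvPad k L n) = n := by
  intro k
  induction k with
  | zero =>
    intro L n hL hn hlt
    have : n = 0 := by simp at hlt; omega
    subst this
    simp [pvPad_zero, pvVal]
  | succ k ih =>
    intro L n hL hn hlt
    have hL1 : (0:Int) < L := by
      rcases (by omega : (0:Int) < L ∨ L = 0) with h | h
      · exact h
      · subst h; simp at hlt; omega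
    rw [pvPad_rec k L n hL hn hlt]
    have hdiv : PySem.Int.floordiv n L = n / L := PySem.Int.floordiv_eq_ediv_of_pos hL1
    have hmod : PySem.Int.mod n L = n % L := PySem.Int.mod_eq_emod_of_pos hL1
    have hndiv_nn : 0 ≤ n / L := Int.ediv_nonneg hn hL1.le
    have hndiv_lt : n / L < L ^ k := by
      by_contra h
      have h0 : L ^ k ≤ n / L := not_lt.mp h
      have h1 : n / L * L ≤ n := Int.ediv_mul_le n (by omega)
      have h2 : L ^ k * L ≤ n / L * L := by nlinarith [pow_pos hL1 k]
      have h3 : L ^ (k + 1) = L ^ k * L := by ring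
      omega
    rw [pvVal, hdiv, ih L (n / L) hL hndiv_nn hndiv_lt, hmod]
    exact Int.emod_add_mul_ediv n L

-- the distinct digit tuples: injectivity of pvPad on the index range
theorem pvPad_nodup (k : Nat) (L : Int) (hL : 0 ≤ L) :
    ((PySem.List.pyRange 0 (L ^ k) 1).map (fun n => pvPad k L n)).Nodup := by
  apply List.Nodup.map_on _ (PySem.List.nodup_pyRange_one 0 (L ^ k))
  intro x hx y hy hxy
  rw [PySem.List.mem_pyRange_one] at hx hy
  have hx' := pvVal_pad k L x hL hx.1 hx.2
  have hy' := pvVal_pad k L y hL hy.1 hy.2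
  rw [← hx', ← hy', hxy]

-- splitting range(0, c*B) into c consecutive blocks of length B
theorem pvRangeBlock {α : Type} (f : Int → α) (B : Int) (hB : 0 ≤ B) :
    ∀ (c : Int), 0 ≤ c →
      (PySem.List.pyRange 0 (c * B) 1).map f
        = (PySem.List.pyRange 0 c 1).flatMap
            (fun v => (PySem.List.pyRange 0 B 1).map (fun n => f (v * B + n))) := by
  intro c hc
  induction c, hc using Int.le_induction with
  | base =>
    simp [PySem.List.pyRange_one_eq_nil]
  | succ c hc ih =>
    have h1 : (0:Int) ≤ c * B := mul_nonneg hc hB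
    have h2 : c * B ≤ (c + 1) * B := by nlinarith
    rw [PySem.List.pyRange_one_append 0 (c * B) ((c + 1) * B) h1 h2,
        PySem.List.pyRange_one_succ_right hc,
        List.map_append, List.flatMap_append, ih]
    congr 1
    have hBeq : ((c + 1) * B - c * B) = B := by ring
    simp only [List.flatMap_cons, List.flatMap_nil, List.append_nil,
      PySem.List.pyRange_one, hBeq, List.map_map, sub_zero]
    apply List.map_congr_left
    intro a _
    simp [Function.comp]

-- the Cartesian-product list is exactly the list of padded digit lists
theorem pvTuples_eq : ∀ (k : Nat) (L : Int), 0 ≤ L →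
    (List.range k).foldl
      (fun ts _ => (PySem.List.pyRange 0 L 1).flatMap (fun v => ts.map (fun t => t ++ [v])))
      [([] : List Int)]
    = (PySem.List.pyRange 0 (L ^ k) 1).map (fun n => pvPad k L n) := by
  intro k
  induction k with
  | zero =>
    intro L hL
    have h1 : PySem.List.pyRange 0 1 1 = [0] := by decide
    simp [h1, pvPad_zero]
  | succ k ih =>
    intro L hL
    rw [List.range_succ, List.foldl_append, ih L hL]
    have hpow : L ^ (k + 1) = L * L ^ k := by ring
    rw [hpow, pvRangeBlock (fun n => pvPad (k + 1) L n) (L ^ k) (pow_nonneg hL k) L hL]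
    simp only [List.foldl_cons, List.foldl_nil]
    apply List.flatMap_congr
    intro v hv
    rw [PySem.List.mem_pyRange_one] at hv
    rw [List.map_map]
    apply List.map_congr_left
    intro n hn
    rw [PySem.List.mem_pyRange_one] at hn
    simp only [Function.comp]
    exact (pvPad_ms k L v n hv.1 hv.2 hn.1 hn.2).symm

-- enumerate of a mapped index range
theorem pvEnumerate_map (g : Int → List Int) (m : Int) :
    PySem.List.enumerate ((PySem.List.pyRange 0 m 1).map g) 0
      = (PySem.List.pyRange 0 m 1).map (fun n => (n, g n)) := by
  apply List.ext_getElem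
  · simp [PySem.List.length_enumerate]
  · intro i h1 h2
    simp [PySem.List.getElem_enumerate, PySem.List.getElem_pyRange_one]

theorem pvMain (k : Nat) (L : Int) (hL : 0 ≤ L) : pvABody k L = pvBBody k L := by
  have hnodup := pvPad_nodup k L hL
  have htup := pvTuples_eq k L hL
  simp only [pvABody, pvBBody, htup]
  rw [PySem.List.foldl_prod_mk
    (f := fun (d : PySem.Dict Int (List Int)) number =>
      d.insert number (pvDigitsGo number.toNat number L ++
        List.replicate (k - (pvDigitsGo number.toNat number L).length) 0))
    (g := fun (d : PySem.Dict (List Int) Int) number =>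
      d.insert (pvDigitsGo number.toNat number L ++
        List.replicate (k - (pvDigitsGo number.toNat number L).length) 0) number)]
  dsimp only
  rw [PySem.Dict.items_foldl_insert_fresh (PySem.List.pyRange 0 (L ^ k) 1) (fun n => n)
      (fun number => pvDigitsGo number.toNat number L ++
        List.replicate (k - (pvDigitsGo number.toNat number L).length) 0)
      PySem.Dict.empty
      (by intro a _; exact PySem.Dict.contains_empty ..)
      (by simpa using PySem.List.nodup_pyRange_one 0 (L ^ k))]
  rw [PySem.Dict.items_foldl_insert_fresh (PySem.List.pyRange 0 (L ^ k) 1)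
      (fun number => pvDigitsGo number.toNat number L ++
        List.replicate (k - (pvDigitsGo number.toNat number L).length) 0)
      (fun n => n) PySem.Dict.empty
      (by intro a _; exact PySem.Dict.contains_empty ..)
      (by exact hnodup)]
  rw [PySem.Dict.items_foldl_insert_fresh
      (PySem.List.enumerate ((PySem.List.pyRange 0 (L ^ k) 1).map (fun n => pvPad k L n)) 0)
      (fun p => p.1) (fun p => p.2) PySem.Dict.empty
      (by intro a _; exact PySem.Dict.contains_empty ..)
      (by rw [PySem.List.map_fst_enumerate]
          exact PySem.List.nodup_pyRange_one _ _)]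
  rw [PySem.Dict.items_foldl_insert_fresh
      (PySem.List.enumerate ((PySem.List.pyRange 0 (L ^ k) 1).map (fun n => pvPad k L n)) 0)
      (fun p => p.2) (fun p => p.1) PySem.Dict.empty
      (by intro a _; exact PySem.Dict.contains_empty ..)
      (by rw [PySem.List.map_snd_enumerate]; exact hnodup)]
  rw [pvEnumerate_map (fun n => pvPad k L n) (L ^ k)]
  simp only [Prod.mk.injEq, List.map_map]
  refine ⟨?_, ?_⟩ <;>
    · apply List.map_congr_left
      intro n _
      rfl

theorem pvWitness_ok : Dom_generate_limited_basis_py pvWitness_generate_limited_basis_py.1 pvWitness_generate_limited_basis_py.2 ∧ Pre_generate_limited_basis_py pvWitness_generate_limited_basis_py.1 pvWitness_generate_limited_basis_py.2 := by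
  constructor <;> decide

-- ===== VERDICT (by name: the statement is the Claim_ definition above) =====
theorem generate_limited_basis_py_spec : Claim_equal_generate_limited_basis_py := by
  intro oc L _ hpre
  unfold Spec_generate_limited_basis_py generate_limited_basis_py generate_limited_basis_py_alt
  exact pvMain _ L hpre
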